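-- pv_equiv track=rewrite | github.com/augustcrasci/idolmaster_calendar | app/refresh_all.py | extract_sort_date
-- ===== SOURCE A (Python) =====
-- def extract_sort_date(raw_value: str) -> str:
--     text = str(raw_value or '').strip()
--     if not text:
--         return ''
--     digits = []
--     token = ''
--     for char in text:
--         if char.isdigit() or char == ':':
--             token += char
--         elif token:
--             digits.append(token)
--             token = ''
--     if token:
--         digits.append(token)
--     if len(digits) >= 3:
--         year, month, day = digits[0], digits[1], digits[2]
--         time_value = digits[3] if len(digits) >= 4 and ':' in digits[3] else '99:99'
--         return f'{int(year):04d}-{int(month):02d}-{int(day):02d} {time_value}'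
--     return text
-- ===== SOURCE B (Python) =====
-- def extract_sort_date(raw_value: str) -> str:
--     text = str(raw_value or '').strip()
--     if not text:
--         return ''
--     # Two-pointer index scan over text, extracting at most the 4 runs the
--     # formatting below can use (only digits[0..3] and whether there are >=3/>=4
--     # runs matter), instead of accumulating every token of the whole string.
--     runs = []
--     i, n = 0, len(text)
--     while i < n and len(runs) < 4:
--         c = text[i]
--         if c.isdigit() or c == ':':
--             j = i
--             while j < n and (text[j].isdigit() or text[j] == ':'):
--                 j += 1
--             runs.append(text[i:j])
--             i = j
--         else:
--             i += 1
--     if len(runs) >= 3: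
--         time_value = runs[3] if len(runs) == 4 and ':' in runs[3] else '99:99'
--         return f'{int(runs[0]):04d}-{int(runs[1]):02d}-{int(runs[2]):02d} {time_value}'
--     return text
-- ===== Notes on version B (the rewrite author's own statement) =====
-- stated objective: alternative
-- what changed: Replaces A's stateful char-accumulator over the whole string (token buffer flushed at boundaries) with a two-pointer index scan that slices each digit/':' run out of the string and stops as soon as the 4 runs the output can use have been found.
-- outside the precondition, e.g. on extract_sort_date('1:2 3 4'): A raises ValueError, B raises ValueError
import Mathlib
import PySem

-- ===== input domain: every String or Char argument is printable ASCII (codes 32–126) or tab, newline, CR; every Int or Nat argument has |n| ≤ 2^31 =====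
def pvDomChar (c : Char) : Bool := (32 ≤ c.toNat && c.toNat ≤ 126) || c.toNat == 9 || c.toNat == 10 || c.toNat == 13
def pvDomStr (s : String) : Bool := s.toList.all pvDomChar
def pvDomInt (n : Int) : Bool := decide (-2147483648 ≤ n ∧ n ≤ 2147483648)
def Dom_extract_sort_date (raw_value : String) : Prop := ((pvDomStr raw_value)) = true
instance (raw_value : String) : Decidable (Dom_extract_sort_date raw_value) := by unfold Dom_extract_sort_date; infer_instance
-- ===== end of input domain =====

-- B replaces A's stateful char-accumulator tokenizer (token buffer flushed at boundaries,
-- over the whole string) by a two-pointer index scan that slices each digit/':' run out of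
-- the string and stops after the 4 runs the output can use (objective: alternative).

-- shared transliteration of the f-string piece f'{int(t):0wd}' (int() result defaulted to 0
-- where Python would raise ValueError; exactly those inputs are excluded by Pre_ below)
def pvFmt (w : Int) (t : List Char) : List Char :=
  PySem.Chars.zfill (PySem.Int.toChars ((PySem.Int.ofChars? t).getD 0)) w

-- ===== PORT A =====
def extract_sort_date (raw_value : String) : String :=
  let text := PySem.Chars.strip raw_value.toList
  if text.isEmpty then "" else
  -- the for-loop with its `token` accumulator, as a foldl over (digits, token)
  let st := text.foldl
    (fun (st : List (List Char) × List Char) c =>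
      if PySem.Chars.isdigit c || c == ':' then (st.1, st.2 ++ [c])
      else if !st.2.isEmpty then (st.1 ++ [st.2], ([] : List Char))
      else st)
    (([] : List (List Char)), ([] : List Char))
  let digits := if !st.2.isEmpty then st.1 ++ [st.2] else st.1
  if 3 ≤ digits.length then
    let year := (digits[0]?).getD []
    let month := (digits[1]?).getD []
    let day := (digits[2]?).getD []
    let time_value :=
      if 4 ≤ digits.length && PySem.Chars.isIn [':'] ((digits[3]?).getD []) then
        (digits[3]?).getD []
      else "99:99".toList
    String.ofList (pvFmt 4 year ++ ['-'] ++ pvFmt 2 month ++ ['-'] ++ pvFmt 2 day ++ [' '] ++ time_value)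
  else String.ofList text

-- ===== PORT B =====
-- the digit/':' predicate of Source B
def pvTok (c : Char) : Bool := PySem.Chars.isdigit c || c == ':'

-- Source B's outer while loop: advance through the chars, and on a run start slice the whole
-- run off (the inner `while j < n` scan / text[i:j] slice rendered as takeWhile/dropWhile),
-- stopping as soon as 4 runs are collected
def pvScan : List Char → List (List Char) → List (List Char)
  | [], runs => runs
  | c :: cs, runs =>
    if 4 ≤ runs.length then runs
    else if pvTok c then
      pvScan ((c :: cs).dropWhile pvTok) (runs ++ [(c :: cs).takeWhile pvTok])
    else pvScan cs runs
termination_by cs _ => cs.length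
decreasing_by
  · simp only [List.dropWhile]
    rename_i h; simp only [h]
    have := List.length_dropWhile_le pvTok cs
    simp; omega
  · simp

def extract_sort_date_alt (raw_value : String) : String :=
  let text := PySem.Chars.strip raw_value.toList
  if text.isEmpty then "" else
  let runs := pvScan text []
  if 3 ≤ runs.length then
    let time_value :=
      if runs.length == 4 && PySem.Chars.isIn [':'] ((runs[3]?).getD []) then
        (runs[3]?).getD []
      else "99:99".toList
    String.ofList (pvFmt 4 ((runs[0]?).getD []) ++ ['-'] ++ pvFmt 2 ((runs[1]?).getD []) ++ ['-']
      ++ pvFmt 2 ((runs[2]?).getD []) ++ [' '] ++ time_value)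
  else String.ofList text

-- ===== PRECONDITION & SPEC =====
-- runs of digit/':' chars in a string, used ONLY to state Pre_ (library splitOnP + filter,
-- distinct from both ports' code)
def pvRuns (cs : List Char) : List (List Char) :=
  (cs.splitOnP (fun c => !(PySem.Chars.isdigit c || c == ':'))).filter (fun t => !t.isEmpty)

-- Pre_ excludes exactly the inputs where Python A raises ValueError: those whose stripped
-- text has ≥ 3 digit/':' runs with a ':' among the first three (int() fails there in A and B alike).
def Pre_extract_sort_date (raw_value : String) : Prop :=
  3 ≤ (pvRuns (PySem.Chars.strip raw_value.toList)).length →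
    ∀ t ∈ (pvRuns (PySem.Chars.strip raw_value.toList)).take 3, ':' ∉ t
instance (raw_value : String) : Decidable (Pre_extract_sort_date raw_value) := by
  unfold Pre_extract_sort_date; infer_instance

def pvWitness_extract_sort_date : String := "2024-05-17 10:30"

def Spec_extract_sort_date (raw_value : String) (out : String) : Prop := out = extract_sort_date_alt raw_value
instance (raw_value : String) (out : String) : Decidable (Spec_extract_sort_date raw_value out) := by unfold Spec_extract_sort_date; infer_instance

-- ===== CLAIM (what is proved, stated in full; the proofs are below) =====
def Claim_equal_extract_sort_date : Prop := ∀ (raw_value : String), Dom_extract_sort_date raw_value → Pre_extract_sort_date raw_value → Spec_extract_sort_date raw_value (extract_sort_date raw_value)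

-- ===== LEMMAS AND PROOFS =====

-- all digit/':' runs of a char list, run by run (proof-side reference tokenization)
def pvRunsAll : List Char → List (List Char)
  | [] => []
  | c :: cs =>
    if pvTok c then ((c :: cs).takeWhile pvTok) :: pvRunsAll ((c :: cs).dropWhile pvTok)
    else pvRunsAll cs
termination_by cs => cs.length
decreasing_by
  · simp only [List.dropWhile]
    rename_i h; simp only [h]
    have := List.length_dropWhile_le pvTok cs
    simp; omega
  · simp

-- A's fold, from state (ds, tok), finalizes to ds ++ (tok merged into the runs of cs)
def pvMerge (tok : List Char) (cs : List Char) : List (List Char) :=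
  if tok.isEmpty then pvRunsAll cs
  else (tok ++ cs.takeWhile pvTok) :: pvRunsAll (cs.dropWhile pvTok)

theorem pv_fold_invariant (cs : List Char) (ds : List (List Char)) (tok : List Char) :
    (let st := cs.foldl
      (fun (st : List (List Char) × List Char) c =>
        if PySem.Chars.isdigit c || c == ':' then (st.1, st.2 ++ [c])
        else if !st.2.isEmpty then (st.1 ++ [st.2], ([] : List Char))
        else st) (ds, tok);
     if !st.2.isEmpty then st.1 ++ [st.2] else st.1)
    = ds ++ pvMerge tok cs := by
  induction cs generalizing ds tok with
  | nil =>
    by_cases h : tok = []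
    · subst h; simp [pvMerge, pvRunsAll]
    · simp [pvMerge, pvRunsAll, List.isEmpty_iff, h]
  | cons c cs ih =>
    by_cases h : pvTok c = true
    · have h' : (PySem.Chars.isdigit c || c == ':') = true := h
      simp only [List.foldl_cons, h', if_pos]
      rw [ih ds (tok ++ [c])]
      congr 1
      by_cases htok : tok = []
      · subst htok
        simp [pvMerge, pvRunsAll, h, List.takeWhile, List.dropWhile]
      · simp [pvMerge, List.isEmpty_iff, htok, List.takeWhile, List.dropWhile, h]
    · have h' : (PySem.Chars.isdigit c || c == ':') = false := by
        simpa [pvTok] using h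
      by_cases htok : tok = []
      · subst htok
        simp only [List.foldl_cons, h', Bool.false_eq_true, if_false, List.isEmpty_nil,
          Bool.not_true, if_false]
        rw [ih ds []]
        simp [pvMerge, pvRunsAll, h]
      · have hne : tok.isEmpty = false := by simp [htok]
        simp only [List.foldl_cons, h', Bool.false_eq_true, if_false, hne, Bool.not_false,
          if_true]
        rw [ih (ds ++ [tok]) []]
        simp [pvMerge, pvRunsAll, h, List.isEmpty_iff, htok]

theorem pv_scan_eq_take (cs : List Char) (runs : List (List Char)) :
    pvScan cs runs = runs ++ (pvRunsAll cs).take (4 - runs.length) := by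
  induction cs using pvRunsAll.induct generalizing runs with
  | case1 => simp [pvScan, pvRunsAll]
  | case2 c cs h ih =>
    by_cases hr : 4 ≤ runs.length
    · simp [pvScan, hr, Nat.sub_eq_zero_of_le hr]
    · rw [pvScan, if_neg hr, if_pos h, ih, pvRunsAll, if_pos h]
      obtain ⟨k, hk⟩ : ∃ k, 4 - runs.length = k + 1 := ⟨4 - runs.length - 1, by omega⟩
      have hk2 : 4 - (runs ++ [(c :: cs).takeWhile pvTok]).length = k := by simp; omega
      rw [hk, hk2, List.take_succ_cons]
      simp
  | case3 c cs h ih =>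
    by_cases hr : 4 ≤ runs.length
    · simp [pvScan, hr, Nat.sub_eq_zero_of_le hr, pvRunsAll, h]
    · rw [pvScan, if_neg hr, if_neg h, ih, pvRunsAll, if_neg h]

theorem pv_digits_eq' (cs : List Char) :
    (if !(cs.foldl
      (fun (st : List (List Char) × List Char) c =>
        if PySem.Chars.isdigit c || c == ':' then (st.1, st.2 ++ [c])
        else if !st.2.isEmpty then (st.1 ++ [st.2], ([] : List Char))
        else st) (([] : List (List Char)), ([] : List Char))).2.isEmpty then
      (cs.foldl
      (fun (st : List (List Char) × List Char) c =>
        if PySem.Chars.isdigit c || c == ':' then (st.1, st.2 ++ [c])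
        else if !st.2.isEmpty then (st.1 ++ [st.2], ([] : List Char))
        else st) (([] : List (List Char)), ([] : List Char))).1 ++
      [(cs.foldl
      (fun (st : List (List Char) × List Char) c =>
        if PySem.Chars.isdigit c || c == ':' then (st.1, st.2 ++ [c])
        else if !st.2.isEmpty then (st.1 ++ [st.2], ([] : List Char))
        else st) (([] : List (List Char)), ([] : List Char))).2]
     else (cs.foldl
      (fun (st : List (List Char) × List Char) c =>
        if PySem.Chars.isdigit c || c == ':' then (st.1, st.2 ++ [c])
        else if !st.2.isEmpty then (st.1 ++ [st.2], ([] : List Char))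
        else st) (([] : List (List Char)), ([] : List Char))).1)
    = pvRunsAll cs := by
  have := pv_fold_invariant cs [] []
  simpa [pvMerge] using this

theorem pv_scan_eq (cs : List Char) : pvScan cs [] = (pvRunsAll cs).take 4 := by
  simpa using pv_scan_eq_take cs []

-- ===== VERDICT (by name: the statement is the Claim_ definition above) =====
theorem extract_sort_date_spec : Claim_equal_extract_sort_date := by
  intro raw_value _ _
  unfold Spec_extract_sort_date extract_sort_date extract_sort_date_alt
  simp only [pv_digits_eq', pv_scan_eq]
  generalize pvRunsAll (PySem.Chars.strip raw_value.toList) = l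
  by_cases he : (PySem.Chars.strip raw_value.toList).isEmpty
  · simp [he]
  · simp only [he, Bool.false_eq_true, if_false]
    by_cases h3 : 3 ≤ l.length
    · have h3' : 3 ≤ (l.take 4).length := by simp; omega
      rw [if_pos h3, if_pos h3',
        List.getElem?_take_of_lt (show (0:Nat) < 4 by norm_num),
        List.getElem?_take_of_lt (show (1:Nat) < 4 by norm_num),
        List.getElem?_take_of_lt (show (2:Nat) < 4 by norm_num),
        List.getElem?_take_of_lt (show (3:Nat) < 4 by norm_num)]
      have hc : ((l.take 4).length == 4) = decide (4 ≤ l.length) := by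
        by_cases h4 : 4 ≤ l.length <;> simp [h4]
      rw [hc]
    · have h3' : ¬ 3 ≤ (l.take 4).length := by simp; omega
      rw [if_neg h3, if_neg h3']
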